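-- pv_equiv track=rewrite | github.com/zhao56164394/qiankun-three-lines-v8 | analysis/test65_gen_sell_research.py | find_qian_change
-- ===== SOURCE A (Python) =====
-- def find_qian_change(gua_seg, target_set=None):
--     """乾 → target_set 中任一卦切换. target_set=None 表示乾→任何非乾"""
--     n = len(gua_seg)
--     in_qian = False
--     for k in range(n):
--         if gua_seg[k] == '111':
--             in_qian = True
--         elif in_qian:
--             if target_set is None or gua_seg[k] in target_set:
--                 return k
--     return n - 1
-- ===== SOURCE B (Python) =====
-- def find_qian_change(gua_seg, target_set=None):
--     """Declarative brute force: an index k qualifies iff its prefix contains '111'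
--     and gua_seg[k] is a matching non-'111' entry; answer is the first qualifying
--     index, else n-1."""
--     n = len(gua_seg)
--     cands = [k for k in range(n)
--              if gua_seg[k] != '111'
--              and (target_set is None or gua_seg[k] in target_set)
--              and '111' in gua_seg[:k]]
--     return cands[0] if cands else n - 1
-- ===== Notes on version B (the rewrite author's own statement) =====
-- stated objective: alternative
-- what changed: Replaces A's single stateful scan with an in_qian flag by a stateless declarative filter: every index is tested independently with a prefix-membership check ('111' in gua_seg[:k]) and the first qualifying index is returned; trades A's O(n*m) scan for a simpler quadratic brute force.
import Mathlib
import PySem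

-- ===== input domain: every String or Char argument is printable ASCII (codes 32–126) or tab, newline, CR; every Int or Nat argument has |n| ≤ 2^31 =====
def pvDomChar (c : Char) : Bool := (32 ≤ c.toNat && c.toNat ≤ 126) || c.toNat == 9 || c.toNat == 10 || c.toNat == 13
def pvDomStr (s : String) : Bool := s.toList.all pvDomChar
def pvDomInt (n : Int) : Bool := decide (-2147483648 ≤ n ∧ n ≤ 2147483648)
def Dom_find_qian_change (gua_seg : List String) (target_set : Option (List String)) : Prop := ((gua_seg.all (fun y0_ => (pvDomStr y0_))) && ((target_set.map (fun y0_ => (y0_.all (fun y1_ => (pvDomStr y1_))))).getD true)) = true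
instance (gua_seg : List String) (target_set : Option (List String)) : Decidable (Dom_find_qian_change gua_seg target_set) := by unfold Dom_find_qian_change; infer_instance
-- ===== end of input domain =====

-- B drops A's stateful in_qian scan for a stateless declarative filter (prefix-membership test per index); same result, simpler but quadratic.

-- 'target_set is None or g in target_set' (the literal condition both Pythons share)
def memT (ts : Option (List String)) (g : String) : Bool :=
  match ts with | none => true | some l => l.contains g

-- ===== PORT A =====
-- A's for-loop: carry the in_qian flag and the running index k; return the first k hit, none otherwise
def goA (ts : Option (List String)) : Bool → Nat → List String → Option Nat
  | _, _, [] => none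
  | inq, k, g :: gs =>
    if g = "111" then goA ts true (k + 1) gs
    else if inq then
      (if memT ts g then some k else goA ts inq (k + 1) gs)
    else goA ts inq (k + 1) gs

def find_qian_change (gua_seg : List String) (target_set : Option (List String)) : Int :=
  match goA target_set false 0 gua_seg with
  | some k => (k : Int)
  | none => (gua_seg.length : Int) - 1

-- ===== PORT B =====
-- the comprehension's condition on one index k: gua_seg[k] != '111', membership in target_set, '111' in gua_seg[:k]
def predB (gua_seg : List String) (ts : Option (List String)) (k : Nat) : Bool :=
  let g := gua_seg.getD k ""          -- gua_seg[k]; k < n in the comprehension, so getD is exact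
  (!(g == "111")) && memT ts g && (gua_seg.take k).contains "111"

def find_qian_change_alt (gua_seg : List String) (target_set : Option (List String)) : Int :=
  let n := gua_seg.length
  match (List.range n).filter (predB gua_seg target_set) with
  | [] => (n : Int) - 1
  | c :: _ => (c : Int)

-- ===== PRECONDITION & SPEC =====
def Spec_find_qian_change (gua_seg : List String) (target_set : Option (List String)) (out : Int) : Prop := out = find_qian_change_alt gua_seg target_set
instance (gua_seg : List String) (target_set : Option (List String)) (out : Int) : Decidable (Spec_find_qian_change gua_seg target_set out) := by unfold Spec_find_qian_change; infer_instance

-- ===== CLAIM (what is proved, stated in full; the proofs are below) =====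
def Claim_equal_find_qian_change : Prop := ∀ (gua_seg : List String) (target_set : Option (List String)), Dom_find_qian_change gua_seg target_set → Spec_find_qian_change gua_seg target_set (find_qian_change gua_seg target_set)

-- ===== LEMMAS AND PROOFS =====

-- the head of a filtered list is the first element satisfying the predicate
theorem head?_filter_eq_find? {α : Type} (p : α → Bool) (l : List α) :
    (l.filter p).head? = l.find? p := by
  induction l with
  | nil => rfl
  | cons a l ih =>
    by_cases h : p a = true
    · simp [List.filter, List.find?, h]
    · simp only [List.filter, List.find?, h]
      simpa [h] using ih

-- A's loop, started at position k with the flag reflecting the prefix, finds the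
-- first index ≥ k satisfying B's stateless predicate
theorem goA_eq_find (ts : Option (List String)) (full : List String) :
    ∀ (suffix : List String) (k : Nat) (inq : Bool),
      full.drop k = suffix → (full.take k).contains "111" = inq →
      goA ts inq k suffix = (List.range' k suffix.length).find? (predB full ts) := by
  intro suffix
  induction suffix with
  | nil => intro k inq _ _; rfl
  | cons g gs ih =>
    intro k inq hdrop htake
    have hk : full[k]? = some g := by
      rw [← Nat.add_zero k, ← List.getElem?_drop, hdrop]; rfl
    have hgetD : full.getD k "" = g := by simp [List.getD, hk]
    have hdrop' : full.drop (k + 1) = gs := by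
      rw [← List.tail_drop, hdrop]; rfl
    have htakesucc : full.take (k + 1) = full.take k ++ [g] := by
      simp [List.take_add_one, hk]
    have hPB : predB full ts k
        = ((!(g == "111")) && memT ts g && (full.take k).contains "111") := by
      unfold predB
      rw [hgetD]
    have hrange : List.range' k (g :: gs).length = k :: List.range' (k + 1) gs.length := by
      simp [List.range'_succ]
    rw [hrange]
    by_cases h111 : g = "111"
    · have hP : predB full ts k = false := by rw [hPB]; simp [h111]
      have htake1 : (full.take (k + 1)).contains "111" = true := by
        simp [htakesucc, h111]
      rw [show goA ts inq k (g :: gs) = goA ts true (k + 1) gs from by simp [goA, h111]]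
      rw [List.find?_cons, hP]
      exact ih (k + 1) true hdrop' htake1
    · have htake1 : (full.take (k + 1)).contains "111" = inq := by
        rw [htakesucc, ← htake]
        simp
        exact fun h => absurd h.symm h111
      cases inq with
      | true =>
        by_cases hm : memT ts g = true
        · have hmem : "111" ∈ full.take k := by simpa using htake
          have hP : predB full ts k = true := by rw [hPB]; simp [h111, hm, hmem]
          simp [goA, h111, hm, hP]
        · have hm' : memT ts g = false := by simpa using hm
          have hP : predB full ts k = false := by rw [hPB]; simp [hm']
          rw [show goA ts true k (g :: gs) = goA ts true (k + 1) gs from by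
            simp [goA, h111, hm']]
          rw [List.find?_cons, hP]
          exact ih (k + 1) true hdrop' htake1
      | false =>
        have hnmem : "111" ∉ full.take k := by simpa using htake
        have hP : predB full ts k = false := by rw [hPB]; simp [hnmem]
        rw [show goA ts false k (g :: gs) = goA ts false (k + 1) gs from by
          simp [goA, h111]]
        rw [List.find?_cons, hP]
        exact ih (k + 1) false hdrop' htake1

-- ===== VERDICT (by name: the statement is the Claim_ definition above) =====
theorem find_qian_change_spec : Claim_equal_find_qian_change := by
  intro gs ts _
  unfold Spec_find_qian_change find_qian_change find_qian_change_alt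
  have hA : goA ts false 0 gs = (List.range' 0 gs.length).find? (predB gs ts) :=
    goA_eq_find ts gs gs 0 false (by simp) (by simp)
  have hB : ((List.range gs.length).filter (predB gs ts)).head?
      = (List.range' 0 gs.length).find? (predB gs ts) := by
    rw [head?_filter_eq_find?, List.range_eq_range']
  rw [hA, ← hB]
  cases hF : (List.range gs.length).filter (predB gs ts) with
  | nil => simp [hF]
  | cons c cs => simp [hF]
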